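-- pv_equiv track=rewrite | github.com/DaniellaPR/Automatizacion-Informes | Pruebas/auto_info_v4.py | fucionar_por_plazos
-- ===== SOURCE A (Python) =====
-- def fucionar_por_plazos (items, marcador = "*", espacio_despues=True, unir_inicio = False):
--
--     resultado = []
--     acumulado = False
--     buffer = []
--     inicio = []
--
--     for token in items:
--         if token == marcador:
--
--             if unir_inicio and inicio:
--                 resultado.append(" ".join(inicio))
--                 inicio = []
--             elif inicio:
--                 resultado.extend(inicio)
--                 inicio = []
--
--             if acumulado:
--                 prefijo = (marcador + " ") if espacio_despues else marcador
--                 resultado.append(prefijo + " ".join(buffer))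
--                 buffer = []
--             acumulado = True
--
--         else:
--             if acumulado:
--                 buffer.append(token)
--             else:
--                 resultado.append(token)
--     if acumulado:
--         prefijo = (marcador + " ") if espacio_despues else marcador
--         resultado.append(prefijo + " ".join(buffer))
--     elif inicio:
--         if unir_inicio:
--             resultado.apend("".join(inicio))
--         else:
--             resultado.extend(inicio)
--
--     return resultado
-- ===== SOURCE B (Python) =====
-- def fucionar_por_plazos(items, marcador="*", espacio_despues=True, unir_inicio=False):
--     # Pass 1: split items into segments delimited by marcador.
--     cerrados = []
--     actual = []
--     for token in items:
--         if token == marcador: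
--             cerrados.append(actual)
--             actual = []
--         else:
--             actual.append(token)
--     segmentos = cerrados + [actual]
--     # Pass 2: first segment goes through token by token; each later segment
--     # is rendered as one prefixed joined string.
--     prefijo = (marcador + " ") if espacio_despues else marcador
--     resultado = list(segmentos[0])
--     for seg in segmentos[1:]:
--         resultado.append(prefijo + " ".join(seg))
--     return resultado
-- ===== Notes on version B (the rewrite author's own statement) =====
-- stated objective: simpler
-- what changed: Replaced the flag-driven state machine (acumulado/buffer plus the dead inicio/unir_inicio logic) by a split-then-format decomposition: one pass splits items into marker-delimited segments, a second pass emits the first segment verbatim and each later segment as one prefixed joined string.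
import Mathlib
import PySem

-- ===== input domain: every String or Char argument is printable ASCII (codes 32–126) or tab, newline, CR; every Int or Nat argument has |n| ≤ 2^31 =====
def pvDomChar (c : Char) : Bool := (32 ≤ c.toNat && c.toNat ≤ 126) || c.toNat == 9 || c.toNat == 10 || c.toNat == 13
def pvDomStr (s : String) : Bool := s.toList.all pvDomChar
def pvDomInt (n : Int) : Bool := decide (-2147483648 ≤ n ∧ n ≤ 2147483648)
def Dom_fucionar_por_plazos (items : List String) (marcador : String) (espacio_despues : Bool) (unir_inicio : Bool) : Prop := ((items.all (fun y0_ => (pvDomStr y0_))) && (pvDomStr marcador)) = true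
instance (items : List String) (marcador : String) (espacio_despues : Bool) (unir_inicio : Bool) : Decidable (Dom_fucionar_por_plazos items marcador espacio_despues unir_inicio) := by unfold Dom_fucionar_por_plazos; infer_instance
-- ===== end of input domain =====

-- B replaces A's flag-driven state machine (with its dead inicio/unir_inicio logic) by a
-- split-into-segments pass followed by a separate formatting pass: simpler decomposition, same cost.

-- ===== PORT A =====
-- loop body of A: state = (resultado, acumulado, buffer, inicio)
def pvStepA (marcador : String) (espacio_despues : Bool) (unir_inicio : Bool)
    (st : List String × Bool × List String × List String) (token : String) :
    List String × Bool × List String × List String :=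
  let resultado := st.1
  let acumulado := st.2.1
  let buffer := st.2.2.1
  let inicio := st.2.2.2
  if token == marcador then
    let ri :=
      if unir_inicio && !inicio.isEmpty then (resultado ++ [PySem.Str.join " " inicio], ([] : List String))
      else if !inicio.isEmpty then (resultado ++ inicio, ([] : List String))
      else (resultado, inicio)
    let rb :=
      if acumulado then
        let prefijo := if espacio_despues then marcador ++ " " else marcador
        (ri.1 ++ [prefijo ++ PySem.Str.join " " buffer], ([] : List String))
      else (ri.1, buffer)
    (rb.1, true, rb.2, ri.2)
  else
    if acumulado then (resultado, acumulado, buffer ++ [token], inicio)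
    else (resultado ++ [token], acumulado, buffer, inicio)

def fucionar_por_plazos (items : List String) (marcador : String) (espacio_despues : Bool) (unir_inicio : Bool) : List String :=
  let st := items.foldl (pvStepA marcador espacio_despues unir_inicio) ([], false, [], [])
  let resultado := st.1
  let acumulado := st.2.1
  let buffer := st.2.2.1
  let inicio := st.2.2.2
  if acumulado then
    let prefijo := if espacio_despues then marcador ++ " " else marcador
    resultado ++ [prefijo ++ PySem.Str.join " " buffer]
  else if !inicio.isEmpty then
    -- NOTE: here A's source writes 'resultado.apend(...)' (a typo that would raise AttributeError)
    -- on the unir_inicio side, but this whole branch is unreachable: inicio is never appended to,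
    -- so inicio = [] always; we port the evident intent of the line.
    if unir_inicio then resultado ++ [PySem.Str.join "" inicio]
    else resultado ++ inicio
  else resultado

-- ===== PORT B =====
-- pass 1 loop body of B: state = (cerrados, actual)
def pvStepB (marcador : String) (st : List (List String) × List String) (token : String) :
    List (List String) × List String :=
  if token == marcador then (st.1 ++ [st.2], [])
  else (st.1, st.2 ++ [token])

def fucionar_por_plazos_alt (items : List String) (marcador : String) (espacio_despues : Bool) (unir_inicio : Bool) : List String :=
  let st := items.foldl (pvStepB marcador) ([], [])
  let segmentos := st.1 ++ [st.2]
  let prefijo := if espacio_despues then marcador ++ " " else marcador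
  match segmentos with
  | [] => []  -- unreachable: segmentos ends with [st.2]
  | s0 :: rest => rest.foldl (fun resultado seg => resultado ++ [prefijo ++ PySem.Str.join " " seg]) s0

-- ===== PRECONDITION & SPEC =====
def Spec_fucionar_por_plazos (items : List String) (marcador : String) (espacio_despues : Bool) (unir_inicio : Bool) (out : List String) : Prop := out = fucionar_por_plazos_alt items marcador espacio_despues unir_inicio
instance (items : List String) (marcador : String) (espacio_despues : Bool) (unir_inicio : Bool) (out : List String) : Decidable (Spec_fucionar_por_plazos items marcador espacio_despues unir_inicio out) := by unfold Spec_fucionar_por_plazos; infer_instance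

-- ===== CLAIM (what is proved, stated in full; the proofs are below) =====
def Claim_equal_fucionar_por_plazos : Prop := ∀ (items : List String) (marcador : String) (espacio_despues : Bool) (unir_inicio : Bool), Dom_fucionar_por_plazos items marcador espacio_despues unir_inicio → Spec_fucionar_por_plazos items marcador espacio_despues unir_inicio (fucionar_por_plazos items marcador espacio_despues unir_inicio)

-- ===== LEMMAS AND PROOFS =====

-- how one rendered segment looks
def pvFmt (marcador : String) (espacio_despues : Bool) (seg : List String) : String :=
  (if espacio_despues then marcador ++ " " else marcador) ++ PySem.Str.join " " seg

-- abstraction: the A-state determined by a B-state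
def pvAbs (marcador : String) (espacio_despues : Bool)
    (st : List (List String) × List String) :
    List String × Bool × List String × List String :=
  match st.1 with
  | [] => (st.2, false, [], [])
  | s0 :: rest => (s0 ++ rest.map (pvFmt marcador espacio_despues), true, st.2, [])

theorem pvStep_comm (marcador : String) (e u : Bool)
    (st : List (List String) × List String) (t : String) :
    pvStepA marcador e u (pvAbs marcador e st) t = pvAbs marcador e (pvStepB marcador st t) := by
  obtain ⟨c, a⟩ := st
  cases c with
  | nil => by_cases h : t == marcador <;> simp [pvStepA, pvStepB, pvAbs, h]
  | cons s0 rest =>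
      by_cases h : t == marcador <;> simp [pvStepA, pvStepB, pvAbs, pvFmt, h]

theorem pvFold_comm (marcador : String) (e u : Bool) (items : List String)
    (st : List (List String) × List String) :
    items.foldl (pvStepA marcador e u) (pvAbs marcador e st)
      = pvAbs marcador e (items.foldl (pvStepB marcador) st) := by
  induction items generalizing st with
  | nil => rfl
  | cons t ts ih => simp only [List.foldl_cons, pvStep_comm]; exact ih _

-- ===== VERDICT (by name: the statement is the Claim_ definition above) =====
theorem fucionar_por_plazos_spec : Claim_equal_fucionar_por_plazos := by
  intro items marcador e u _
  show fucionar_por_plazos items marcador e u = fucionar_por_plazos_alt items marcador e u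
  unfold fucionar_por_plazos fucionar_por_plazos_alt
  have h0 : (([], false, [], []) : List String × Bool × List String × List String)
      = pvAbs marcador e ([], []) := rfl
  rw [h0, pvFold_comm]
  obtain ⟨c, a⟩ := items.foldl (pvStepB marcador) ([], [])
  cases c with
  | nil => simp [pvAbs]
  | cons s0 rest =>
      simp only [pvAbs, PySem.List.foldl_append_singleton_eq_map]
      simp [pvFmt]
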